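-- pv_equiv track=rewrite | github.com/marufmurtuza/code-practice | Repetation/Repetation.py | repitation
-- ===== SOURCE A (Python) =====
-- def repitation(source):
--     index=0
--     unique_list=[0]*len(source)
--     repitation_counter=[0]*len(source)
--     while index<len(source):
--         check =source[index]
--         pointer_one=0
--         counter=0
--         while pointer_one <len(source):
--             if source[pointer_one]==check:
--                 counter+=1
--                 pointer_one+=1
--             else:
--                 pointer_one+=1
--         val=False
--         i=0
--         while i<len(source):
--             if unique_list[i]==check:
--                 val=True
--                 break
--             i+=1
--         index+=1
--         if val:
--             continue
--         else:
--             unique_list[index-1]=check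
--             if counter >1:
--                 repitation_counter[index-1]=counter
--             else:
--                 repitation_counter[index-1]=0
--
--     ##check repitation array same time of repitation or not
--     index_of_check=0
--     val=False
--     while index_of_check<len(repitation_counter):
--         checker=repitation_counter[index_of_check]
--         index_of_match=0
--         counter=0
--         index_of_check+=1
--         while index_of_match<len(repitation_counter):
--             if repitation_counter[index_of_match] ==checker and checker!=0:
--                 counter+=1
--             index_of_match+=1
--         if counter>1:
--             val=True
--             break
--     if val:
--         return("true")
--     else:
--         return("false")
-- ===== SOURCE B (Python) =====
-- def repitation(source):
--     counts = {}
--     for x in source: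
--         counts[x] = counts.get(x, 0) + 1
--     reps = [c for c in counts.values() if c > 1]
--     return "true" if len(reps) > len(set(reps)) else "false"
-- ===== Notes on version B (the rewrite author's own statement) =====
-- stated objective: faster
-- what changed: Replaces the three nested index-scanning while loops (recount per element, linear membership probe, quadratic duplicate scan over the counter array) with a single dict-counting pass plus a set-based duplicate check on the repetition counts.
-- intended difference: On inputs where 0 occurs more than once, some nonzero value has exactly the same count, and no two distinct nonzero values share a repeated count, A returns "false" because its zero-prefilled unique_list makes the value 0 look already seen and its count is silently dropped, while B returns "true", the intended answer since two distinct values do share a repetition count. — e.g. on repitation([0, 0, 1, 1]): A returns "false", B returns "true"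
import Mathlib
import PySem

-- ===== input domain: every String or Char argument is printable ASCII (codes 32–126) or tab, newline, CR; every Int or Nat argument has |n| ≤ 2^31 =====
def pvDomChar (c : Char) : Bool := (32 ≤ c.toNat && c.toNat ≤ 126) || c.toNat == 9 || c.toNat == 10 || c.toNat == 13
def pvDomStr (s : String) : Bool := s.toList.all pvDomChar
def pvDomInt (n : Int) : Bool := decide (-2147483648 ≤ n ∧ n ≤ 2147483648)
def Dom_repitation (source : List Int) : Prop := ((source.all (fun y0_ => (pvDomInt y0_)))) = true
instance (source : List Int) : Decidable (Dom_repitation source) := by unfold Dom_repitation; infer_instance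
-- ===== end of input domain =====

-- B replaces A's nested quadratic index-scanning while loops by a single dict-counting pass
-- plus a set-based duplicate test on the repetition counts (objective: faster); on the D_ inputs
-- below, where A silently drops the count of the value 0, B returns the intended answer.

-- ===== PORT A =====
def aCount (source : List Int) (check : Int) (p : Nat) (counter : Int) : Int :=
  if p < source.length then
    (if source.getD p 0 == check then aCount source check (p + 1) (counter + 1)
     else aCount source check (p + 1) counter)
  else counter
termination_by source.length - p
def aMem (ul : List Int) (check : Int) (n i : Nat) : Bool :=
  if i < n then
    (if ul.getD i 0 == check then true else aMem ul check n (i + 1))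
  else false
termination_by n - i
def aPhase1 (source : List Int) (index : Nat) (uniq rep : List Int) : List Int × List Int :=
  if index < source.length then
    let check := source.getD index 0
    let counter := aCount source check 0 0
    let val := aMem uniq check source.length 0
    if val then aPhase1 source (index + 1) uniq rep
    else aPhase1 source (index + 1) (uniq.set ((index + 1) - 1) check)
           (rep.set ((index + 1) - 1) (if counter > 1 then counter else 0))
  else (uniq, rep)
termination_by source.length - index
def aInner (rep : List Int) (checker : Int) (j : Nat) (counter : Int) : Int :=
  if j < rep.length then
    (if rep.getD j 0 == checker && checker != 0 then aInner rep checker (j + 1) (counter + 1)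
     else aInner rep checker (j + 1) counter)
  else counter
termination_by rep.length - j
def aPhase2 (rep : List Int) (ioc : Nat) : Bool :=
  if ioc < rep.length then
    let checker := rep.getD ioc 0
    let counter := aInner rep checker 0 0
    if counter > 1 then true else aPhase2 rep (ioc + 1)
  else false
termination_by rep.length - ioc
def repitation (source : List Int) : String :=
  let p := aPhase1 source 0 (List.replicate source.length 0) (List.replicate source.length 0)
  if aPhase2 p.2 0 then "true" else "false"

-- ===== PORT B =====
-- counts = {}; for x in source: counts[x] = counts.get(x, 0) + 1
def altCounts (source : List Int) : PySem.Dict Int Int :=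
  source.foldl (fun d x => d.insert x (d.getD x 0 + 1)) PySem.Dict.empty

def repitation_alt (source : List Int) : String :=
  let counts := altCounts source
  let reps := counts.values.filter (fun c => decide (c > 1))
  if reps.length > (PySem.Set.ofList reps).length then "true" else "false"

-- ===== PRECONDITION & SPEC =====
-- On inputs where 0 occurs more than once, some nonzero value has exactly the same count, and no
-- two distinct nonzero values share a repeated count, A returns "false" (its zero-prefilled
-- unique_list makes the value 0 look already seen, so 0's count is silently dropped) while B
-- returns "true", the intended answer since two distinct values do share a repetition count.
def D_repitation (source : List Int) : Prop :=
  1 < source.count 0 ∧ (∃ v ∈ source, v ≠ 0 ∧ source.count v = source.count 0) ∧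
  ∀ v ∈ source, ∀ w ∈ source, v ≠ 0 → w ≠ 0 → v ≠ w → 1 < source.count v →
    source.count v ≠ source.count w
instance (source : List Int) : Decidable (D_repitation source) := by
  unfold D_repitation; infer_instance

def Spec_repitation (source : List Int) (out : String) : Prop :=
  ¬ D_repitation source → out = repitation_alt source
instance (source : List Int) (out : String) : Decidable (Spec_repitation source out) := by
  unfold Spec_repitation; infer_instance

def pvDiffWitness_repitation : List Int := [0, 0, 1, 1]
def pvDiffWitnessOut_repitation : String × String := ("false", "true")

-- ===== CLAIM (what is proved, stated in full; the proofs are below) =====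
def Claim_unchanged_repitation : Prop :=
  ∀ (source : List Int), Dom_repitation source → Spec_repitation source (repitation source)
def Claim_changed_repitation : Prop :=
  Dom_repitation (pvDiffWitness_repitation) ∧ D_repitation (pvDiffWitness_repitation) ∧
  repitation (pvDiffWitness_repitation) = pvDiffWitnessOut_repitation.1 ∧
  repitation_alt (pvDiffWitness_repitation) = pvDiffWitnessOut_repitation.2 ∧
  pvDiffWitnessOut_repitation.1 ≠ pvDiffWitnessOut_repitation.2
def Claim_exact_repitation : Prop :=
  ∀ (source : List Int), Dom_repitation source → D_repitation source →
    repitation source ≠ repitation_alt source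

-- ===== LEMMAS AND PROOFS =====

-- A's "repetition counts": counts (> 1) of the distinct NONZERO values, in first-occurrence order
def repsM (source : List Int) : List Int :=
  ((PySem.Set.ofList (source.filter (fun x => x != 0))).map
    (fun v => (source.count v : Int))).filter (fun c => decide (c > 1))

-- B's "repetition counts": counts (> 1) of ALL distinct values, in first-occurrence order
def repsAll (source : List Int) : List Int :=
  ((PySem.Set.ofList source).map (fun v => (source.count v : Int))).filter
    (fun c => decide (c > 1))

theorem aCount_eq (source : List Int) (check : Int) :
    ∀ p counter, aCount source check p counter = counter + ((source.drop p).count check : Int) := by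
  intro p counter
  fun_induction aCount source check p counter with
  | case1 p counter h heq ih =>
      rw [ih, List.drop_eq_getElem_cons h, List.count_cons]
      simp [List.getD_eq_getElem?_getD, List.getElem?_eq_getElem h] at heq
      simp [heq]
      ring
  | case2 p counter h heq ih =>
      rw [ih, List.drop_eq_getElem_cons h, List.count_cons]
      simp [List.getD_eq_getElem?_getD, List.getElem?_eq_getElem h] at heq
      simp [heq]
  | case3 p counter h =>
      simp [List.drop_eq_nil_of_le (by omega : source.length ≤ p)]

theorem aMem_eq (ul : List Int) (check : Int) :
    ∀ i, aMem ul check ul.length i = (ul.drop i).contains check := by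
  intro i
  fun_induction aMem ul check ul.length i with
  | case1 i h heq =>
      simp [List.getD_eq_getElem?_getD, List.getElem?_eq_getElem h] at heq
      rw [List.drop_eq_getElem_cons h]
      simp [heq]
  | case2 i h heq ih =>
      simp [List.getD_eq_getElem?_getD, List.getElem?_eq_getElem h] at heq
      rw [ih, List.drop_eq_getElem_cons h]
      simp only [List.contains_cons]
      have hne : ¬ check = ul[i] := fun h' => heq h'.symm
      simp [hne]
  | case3 i h =>
      simp [List.drop_eq_nil_of_le (by omega : ul.length ≤ i)]

theorem aInner_eq (rep : List Int) (checker : Int) :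
    ∀ j counter, aInner rep checker j counter =
      counter + (if checker = 0 then 0 else ((rep.drop j).count checker : Int)) := by
  intro j counter
  fun_induction aInner rep checker j counter with
  | case1 j counter h heq ih =>
      rw [ih, List.drop_eq_getElem_cons h, List.count_cons]
      simp [List.getD_eq_getElem?_getD, List.getElem?_eq_getElem h] at heq
      obtain ⟨h1, h2⟩ := heq
      simp [h1, h2]
      ring
  | case2 j counter h heq ih =>
      rw [ih, List.drop_eq_getElem_cons h, List.count_cons]
      simp [List.getD_eq_getElem?_getD, List.getElem?_eq_getElem h] at heq
      by_cases hz : checker = 0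
      · simp [hz]
      · simp [hz] at heq ⊢
        simp [heq]
  | case3 j counter h =>
      simp [List.drop_eq_nil_of_le (by omega : rep.length ≤ j)]

theorem aPhase2_eq (rep : List Int) :
    ∀ ioc, aPhase2 rep ioc =
      (rep.drop ioc).any (fun c => decide (c ≠ 0) && decide ((rep.count c : Int) > 1)) := by
  intro ioc
  fun_induction aPhase2 rep ioc with
  | case1 ioc h checker counter hgt =>
      have hgt' : aInner rep (rep.getD ioc 0) 0 0 > 1 := hgt
      rw [aInner_eq] at hgt'
      have hg : rep.getD ioc 0 = rep[ioc] := by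
        simp [List.getD_eq_getElem?_getD, List.getElem?_eq_getElem h]
      rw [List.drop_eq_getElem_cons h]
      by_cases hz : rep[ioc] = 0
      · rw [hg, hz] at hgt'; simp at hgt'
      · rw [hg] at hgt'
        simp [hz] at hgt'
        symm
        simp only [List.any_cons, Bool.or_eq_true, List.any_eq_true, Bool.and_eq_true,
          decide_eq_true_eq]
        exact Or.inl ⟨hz, by exact_mod_cast hgt'⟩
  | case2 ioc h checker counter hgt ih =>
      have hgt' : ¬ aInner rep (rep.getD ioc 0) 0 0 > 1 := hgt
      rw [aInner_eq] at hgt'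
      have hg : rep.getD ioc 0 = rep[ioc] := by
        simp [List.getD_eq_getElem?_getD, List.getElem?_eq_getElem h]
      rw [ih, List.drop_eq_getElem_cons h]
      simp only [List.any_cons]
      by_cases hz : rep[ioc] = 0
      · simp [hz]
      · rw [hg] at hgt'
        simp [hz] at hgt'
        have : ¬ ((rep.count rep[ioc] : Int) > 1) := by omega
        simp [this]
  | case3 ioc h =>
      simp [List.drop_eq_nil_of_le (by omega : rep.length ≤ ioc)]

theorem foldl_add_sublist (l : List Int) :
    ∀ s : List Int, ∃ t, List.foldl PySem.Set.add s l = s ++ t ∧ t.Sublist l := by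
  induction l with
  | nil => intro s; exact ⟨[], by simp⟩
  | cons x l ih =>
      intro s
      simp only [List.foldl_cons]
      by_cases hx : x ∈ s
      · rw [PySem.Set.add_of_mem hx]
        obtain ⟨t, ht, hs⟩ := ih s
        exact ⟨t, ht, hs.cons x⟩
      · rw [PySem.Set.add_of_not_mem hx]
        obtain ⟨t, ht, hs⟩ := ih (s ++ [x])
        exact ⟨x :: t, by simpa using ht, hs.cons₂ x⟩

theorem ofList_sublist (l : List Int) : (PySem.Set.ofList l).Sublist l := by
  obtain ⟨t, ht, hs⟩ := foldl_add_sublist l []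
  rw [PySem.Set.ofList_eq_foldl, ht]
  simpa using hs

theorem ofList_length_lt_iff (l : List Int) :
    (PySem.Set.ofList l).length < l.length ↔ ¬ l.Nodup := by
  constructor
  · intro hlt hnd
    have hperm : (PySem.Set.ofList l).Perm l := by
      rw [List.perm_ext_iff_of_nodup (PySem.Set.nodup_ofList l) hnd]
      intro a; exact PySem.Set.mem_ofList (xs := l) a
    have := hperm.length_eq
    omega
  · intro hnd
    have hle := (ofList_sublist l).length_le
    rcases lt_or_eq_of_le hle with h | h
    · exact h
    · exfalso
      have heq := (ofList_sublist l).eq_of_length h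
      have := PySem.Set.nodup_ofList (xs := l)
      rw [heq] at this
      exact hnd this

theorem ofList_append_singleton (l : List Int) (x : Int) :
    PySem.Set.ofList (l ++ [x]) = PySem.Set.add (PySem.Set.ofList l) x := by
  rw [PySem.Set.ofList_eq_foldl, PySem.Set.ofList_eq_foldl, List.foldl_append]
  rfl

theorem aPhase1_filter (source : List Int) :
    ∀ index uniq rep,
      uniq.length = source.length → rep.length = source.length →
      uniq.drop index = List.replicate (source.length - index) 0 →
      rep.drop index = List.replicate (source.length - index) 0 →
      (∀ ch : Int, ch ≠ 0 →
        (ch ∈ uniq ↔ ch ∈ PySem.Set.ofList ((source.take index).filter (fun x => x != 0)))) →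
      (rep.take index).filter (fun c => decide (c ≠ 0)) =
        ((PySem.Set.ofList ((source.take index).filter (fun x => x != 0))).map
          (fun v => (source.count v : Int))).filter (fun c => decide (c > 1)) →
      ((aPhase1 source index uniq rep).2).filter (fun c => decide (c ≠ 0)) = repsM source := by
  intro index
  induction hfuel : source.length - index using Nat.strongRecOn generalizing index with
  | _ fuel ih =>
  intro uniq rep h1 h2 h3 h4 h5 h6
  rw [aPhase1]
  by_cases hin : index < source.length
  · simp only [hin, if_true]
    have hg : source.getD index 0 = source[index] := by
      simp [List.getD_eq_getElem?_getD, List.getElem?_eq_getElem hin]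
    have hu0 : uniq[index]'(by omega) = 0 := by
      have h := congrArg (fun l => l.getD 0 0) h3
      simpa [List.getD_eq_getElem?_getD, List.getElem?_drop,
        List.getElem?_eq_getElem (show index < uniq.length by omega),
        List.getElem?_replicate, show 0 < fuel by omega] using h
    have hr0 : rep[index]'(by omega) = 0 := by
      have h := congrArg (fun l => l.getD 0 0) h4
      simpa [List.getD_eq_getElem?_getD, List.getElem?_drop,
        List.getElem?_eq_getElem (show index < rep.length by omega),
        List.getElem?_replicate, show 0 < fuel by omega] using h
    have hmem : aMem uniq (source.getD index 0) source.length 0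
        = decide (source[index] ∈ uniq) := by
      rw [← h1, aMem_eq, hg]
      simp
    by_cases hval : source[index] ∈ uniq
    · rw [hmem]
      simp only [hval, decide_true, if_true]
      have hset : ((source.take (index+1)).filter (fun x => x != 0)) =
          ((source.take index).filter (fun x => x != 0)) ∨
          PySem.Set.ofList ((source.take (index+1)).filter (fun x => x != 0)) =
          PySem.Set.ofList ((source.take index).filter (fun x => x != 0)) := by
        rw [List.take_succ_eq_append_getElem hin, List.filter_append]
        by_cases hz : source[index] = 0
        · left; simp [hz]
        · right
          have : (List.filter (fun x => x != 0) [source[index]]) = [source[index]] := by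
            simp [hz]
          rw [this, ofList_append_singleton]
          have hm : source[index] ∈ PySem.Set.ofList ((source.take index).filter (fun x => x != 0)) :=
            (h5 _ hz).mp hval
          rw [PySem.Set.add_of_mem hm]
      have hsetEq : PySem.Set.ofList ((source.take (index+1)).filter (fun x => x != 0)) =
          PySem.Set.ofList ((source.take index).filter (fun x => x != 0)) := by
        rcases hset with h | h
        · rw [h]
        · exact h
      refine ih (source.length - (index+1)) (by omega) (index+1) rfl uniq rep h1 h2 ?_ ?_ ?_ ?_
      · rw [← List.drop_drop, h3, List.drop_replicate]
        congr 1; omega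
      · rw [← List.drop_drop, h4, List.drop_replicate]
        congr 1; omega
      · intro ch hch
        rw [hsetEq]; exact h5 ch hch
      · rw [List.take_succ_eq_append_getElem (by omega), List.filter_append, hsetEq, ← h6]
        simp [hr0]
    · rw [hmem]
      simp only [hval, decide_false]
      have hck : aCount source (source.getD index 0) 0 0 = (source.count source[index] : Int) := by
        rw [aCount_eq, hg]; simp
      have h0mem : (0:Int) ∈ uniq := by
        have : uniq[index]'(by omega) ∈ uniq := List.getElem_mem _
        rwa [hu0] at this
      have hz : source[index] ≠ 0 := by
        intro h0; rw [h0] at hval; exact hval h0mem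
      have hnotin : source[index] ∉ PySem.Set.ofList ((source.take index).filter (fun x => x != 0)) := by
        intro hm; exact hval ((h5 _ hz).mpr hm)
      have huniq : uniq.set ((index+1)-1) (source.getD index 0)
          = uniq.take index ++ source[index] :: uniq.drop (index+1) := by
        simp only [Nat.add_sub_cancel, hg]
        exact List.set_eq_take_cons_drop _ (by omega)
      set w : Int := if aCount source (source.getD index 0) 0 0 > 1
          then aCount source (source.getD index 0) 0 0 else 0 with hw
      have hrep : rep.set ((index+1)-1) w = rep.take index ++ w :: rep.drop (index+1) := by
        simp only [Nat.add_sub_cancel]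
        exact List.set_eq_take_cons_drop _ (by omega)
      have hsetEq : PySem.Set.ofList ((source.take (index+1)).filter (fun x => x != 0)) =
          PySem.Set.ofList ((source.take index).filter (fun x => x != 0)) ++ [source[index]] := by
        rw [List.take_succ_eq_append_getElem hin, List.filter_append]
        have : (List.filter (fun x => x != 0) [source[index]]) = [source[index]] := by
          simp [hz]
        rw [this, ofList_append_singleton, PySem.Set.add_of_not_mem hnotin]
      refine ih (source.length - (index+1)) (by omega) (index+1) rfl _ _ ?_ ?_ ?_ ?_ ?_ ?_
      · rw [List.length_set]; exact h1
      · rw [List.length_set]; exact h2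
      · rw [huniq]
        have hL : uniq.take index ++ source[index] :: uniq.drop (index+1)
            = (uniq.take index ++ [source[index]]) ++ uniq.drop (index+1) := by simp
        have hlen : (uniq.take index ++ [source[index]]).length = index + 1 := by
          simp; omega
        rw [hL, List.drop_left' hlen, ← List.drop_drop, h3, List.drop_replicate]
        congr 1; omega
      · rw [hrep]
        have hL : rep.take index ++ w :: rep.drop (index+1)
            = (rep.take index ++ [w]) ++ rep.drop (index+1) := by simp
        have hlen : (rep.take index ++ [w]).length = index + 1 := by
          simp; omega
        rw [hL, List.drop_left' hlen, ← List.drop_drop, h4, List.drop_replicate]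
        congr 1; omega
      · intro ch hch
        rw [huniq, hsetEq]
        have hdrop0 : ch ∉ uniq.drop (index+1) := by
          rw [← List.drop_drop, h3, List.drop_replicate]
          simp [List.mem_replicate, hch]
        have huold : uniq = uniq.take index ++ (0:Int) :: uniq.drop (index+1) := by
          conv_lhs => rw [← List.take_append_drop index uniq]
          rw [List.drop_eq_getElem_cons (by omega : index < uniq.length), hu0]
        constructor
        · intro hm
          rcases List.mem_append.mp hm with hm | hm
          · have : ch ∈ uniq := by rw [huold]; exact List.mem_append_left _ hm
            exact List.mem_append_left _ ((h5 ch hch).mp this)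
          · rcases List.mem_cons.mp hm with hm | hm
            · exact List.mem_append_right _ (by simp [hm])
            · exact absurd hm hdrop0
        · intro hm
          rcases List.mem_append.mp hm with hm | hm
          · have : ch ∈ uniq := (h5 ch hch).mpr hm
            rw [huold] at this
            rcases List.mem_append.mp this with h' | h'
            · exact List.mem_append_left _ h'
            · rcases List.mem_cons.mp h' with h' | h'
              · exact absurd h' hch
              · exact absurd h' hdrop0
          · simp at hm
            exact List.mem_append_right _ (by simp [hm])
      · rw [hrep]
        have hL : rep.take index ++ w :: rep.drop (index+1)
            = (rep.take index ++ [w]) ++ rep.drop (index+1) := by simp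
        rw [hL, List.take_append_of_le_length (by simp; omega)]
        have htk : (rep.take index ++ [w]).take (index+1) = rep.take index ++ [w] := by
          apply List.take_of_length_le; simp
        rw [htk, List.filter_append, h6, hsetEq, List.map_append, List.filter_append]
        congr 1
        rw [hck] at hw
        by_cases hgt : (source.count source[index] : Int) > 1
        · have hw' : w = (source.count source[index] : Int) := by rw [hw]; simp [hgt]
          simp [hw', hgt]
          omega
        · have hw' : w = 0 := by rw [hw]; simp [hgt]
          simp [hw', hgt]
  · simp only [hin, if_false]
    have hidx : source.length ≤ index := by omega
    have htkr : rep.take index = rep := List.take_of_length_le (by omega)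
    have htks : source.take index = source := List.take_of_length_le (by omega)
    rw [← htkr]
    rw [h6, htks]
    rfl

theorem any_dup (rep : List Int) :
    (rep.any (fun c => decide (c ≠ 0) && decide ((rep.count c : Int) > 1)))
      = decide (¬ (rep.filter (fun c => decide (c ≠ 0))).Nodup) := by
  rw [Bool.eq_iff_iff]
  simp only [List.any_eq_true, Bool.and_eq_true, decide_eq_true_eq]
  rw [List.nodup_iff_count_le_one]
  constructor
  · rintro ⟨c, hc, hc0, hcnt⟩ hle
    have h := hle c
    rw [List.count_filter (by simp [hc0])] at h
    omega
  · intro h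
    push Not at h
    obtain ⟨a, ha⟩ := h
    have hmem : a ∈ rep.filter (fun c => decide (c ≠ 0)) := by
      apply List.count_pos_iff.mp; omega
    have ⟨ham, ha0⟩ := List.mem_filter.mp hmem
    refine ⟨a, ham, by simpa using ha0, ?_⟩
    rw [List.count_filter (by simpa using ha0)] at ha
    exact_mod_cast by omega

theorem repitation_eq (source : List Int) :
    repitation source = (if ¬ (repsM source).Nodup then "true" else "false") := by
  unfold repitation
  have hfil : ((aPhase1 source 0 (List.replicate source.length 0)
      (List.replicate source.length 0)).2).filter (fun c => decide (c ≠ 0)) = repsM source := by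
    apply aPhase1_filter source 0 _ _ (by simp) (by simp) (by simp) (by simp)
    · intro ch hch
      simp [List.mem_replicate, hch]
    · simp
  simp only [aPhase2_eq, List.drop_zero, any_dup, hfil]
  by_cases h : (repsM source).Nodup <;> simp [h]

theorem repitation_alt_eq (source : List Int) :
    repitation_alt source = (if ¬ (repsAll source).Nodup then "true" else "false") := by
  have hmap : (PySem.Set.ofList source).map
      (fun k => (PySem.Dict.counter source).getD k 0)
      = (PySem.Set.ofList source).map (fun v => (source.count v : Int)) := by
    apply List.map_congr_left
    intro k _
    rw [PySem.Dict.getD_counter]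
  have hfold : altCounts source = PySem.Dict.counter source := by
    unfold altCounts
    rw [PySem.Dict.foldl_insert_getD_add_one_eq_counter]
  unfold repitation_alt
  show (if (List.filter (fun c => decide (c > 1)) (altCounts source).values).length >
      (PySem.Set.ofList (List.filter (fun c => decide (c > 1))
        (altCounts source).values)).length then "true" else "false") = _
  rw [hfold]
  rw [PySem.Dict.values_eq_map_keys _ (PySem.Dict.nodup_keys_counter _) 0, PySem.Dict.keys_counter]
  rw [hmap]
  show (if (repsAll source).length > (PySem.Set.ofList (repsAll source)).length
      then "true" else "false") = _
  have hiff := ofList_length_lt_iff (repsAll source)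
  by_cases h : (repsAll source).Nodup
  · rw [if_neg (by simp only [gt_iff_lt]; rw [hiff]; simp [h]), if_neg (by simp [h])]
  · rw [if_pos (by simp only [gt_iff_lt]; rw [hiff]; simp [h]), if_pos (by simp [h])]

-- duplicate characterization: the filtered count-map over a nodup list has a duplicate iff
-- two distinct listed values share an equal repeated count
theorem not_nodup_reps_iff (S : List Int) (hS : S.Nodup) (source : List Int) :
    ¬ (((S.map (fun v => (source.count v : Int))).filter (fun c => decide (c > 1))).Nodup) ↔
      ∃ v ∈ S, ∃ w ∈ S, v ≠ w ∧ 1 < source.count v ∧ source.count v = source.count w := by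
  rw [List.filter_map]
  rw [List.nodup_map_iff_inj_on (hS.filter _)]
  constructor
  · intro h
    push Not at h
    obtain ⟨v, hv, w, hw, hvw, hne⟩ := h
    have hv' := List.mem_filter.mp hv
    have hw' := List.mem_filter.mp hw
    refine ⟨v, hv'.1, w, hw'.1, hne, ?_, ?_⟩
    · have := hv'.2; simp at this; exact_mod_cast this
    · exact_mod_cast hvw
  · rintro ⟨v, hv, w, hw, hne, hgt, hc⟩ h
    have hgt' : 1 < source.count w := hc ▸ hgt
    have := h v (List.mem_filter.mpr ⟨hv, by simp; exact_mod_cast hgt⟩)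
      w (List.mem_filter.mpr ⟨hw, by simp; exact_mod_cast hgt'⟩) (by exact_mod_cast hc)
    exact hne this

theorem not_nodup_repsM_iff (source : List Int) :
    ¬ (repsM source).Nodup ↔
      ∃ v ∈ source, ∃ w ∈ source, v ≠ 0 ∧ w ≠ 0 ∧ v ≠ w ∧
        1 < source.count v ∧ source.count v = source.count w := by
  unfold repsM
  rw [not_nodup_reps_iff _ (PySem.Set.nodup_ofList _) source]
  constructor
  · rintro ⟨v, hv, w, hw, hne, hgt, hc⟩
    rw [PySem.Set.mem_ofList, List.mem_filter] at hv hw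
    exact ⟨v, hv.1, w, hw.1, by simpa using hv.2, by simpa using hw.2, hne, hgt, hc⟩
  · rintro ⟨v, hv, w, hw, hv0, hw0, hne, hgt, hc⟩
    refine ⟨v, ?_, w, ?_, hne, hgt, hc⟩
    · rw [PySem.Set.mem_ofList, List.mem_filter]; simp [hv, hv0]
    · rw [PySem.Set.mem_ofList, List.mem_filter]; simp [hw, hw0]

theorem not_nodup_repsAll_iff (source : List Int) :
    ¬ (repsAll source).Nodup ↔
      ∃ v ∈ source, ∃ w ∈ source, v ≠ w ∧
        1 < source.count v ∧ source.count v = source.count w := by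
  unfold repsAll
  rw [not_nodup_reps_iff _ (PySem.Set.nodup_ofList _) source]
  constructor
  · rintro ⟨v, hv, w, hw, hne, hgt, hc⟩
    rw [PySem.Set.mem_ofList] at hv hw
    exact ⟨v, hv, w, hw, hne, hgt, hc⟩
  · rintro ⟨v, hv, w, hw, hne, hgt, hc⟩
    refine ⟨v, ?_, w, ?_, hne, hgt, hc⟩
    · rw [PySem.Set.mem_ofList]; exact hv
    · rw [PySem.Set.mem_ofList]; exact hw

-- ===== VERDICT (by name: the statements are the Claim_ definitions above) =====
theorem repitation_spec : Claim_unchanged_repitation := by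
  intro source _
  unfold Spec_repitation
  intro hD
  rw [repitation_eq, repitation_alt_eq]
  congr 1
  rw [eq_iff_iff, not_nodup_repsM_iff, not_nodup_repsAll_iff]
  constructor
  · rintro ⟨v, hv, w, hw, _, _, hne, hgt, hc⟩
    exact ⟨v, hv, w, hw, hne, hgt, hc⟩
  · rintro ⟨v, hv, w, hw, hne, hgt, hc⟩
    by_cases hclause : ∀ a ∈ source, ∀ b ∈ source, a ≠ 0 → b ≠ 0 → a ≠ b →
        1 < source.count a → source.count a ≠ source.count b
    · by_cases hv0 : v = 0
      · subst hv0
        have hw0 : w ≠ 0 := fun h => hne h.symm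
        exact absurd ⟨hgt, ⟨w, hw, hw0, hc.symm⟩, hclause⟩ hD
      · by_cases hw0 : w = 0
        · subst hw0
          exact absurd ⟨hc ▸ hgt, ⟨v, hv, hv0, hc⟩, hclause⟩ hD
        · exact ⟨v, hv, w, hw, hv0, hw0, hne, hgt, hc⟩
    · push Not at hclause
      obtain ⟨a, ha, b, hb, ha0, hb0, hab, hagt, hacc⟩ := hclause
      exact ⟨a, ha, b, hb, ha0, hb0, hab, hagt, hacc⟩

theorem repitation_changed : Claim_changed_repitation := by
  unfold Claim_changed_repitation pvDiffWitness_repitation pvDiffWitnessOut_repitation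
  refine ⟨by decide, by decide, ?_, ?_, by decide⟩
  · rw [repitation_eq, if_neg]
    decide
  · rw [repitation_alt_eq, if_pos]
    decide

theorem repitation_tight : Claim_exact_repitation := by
  intro source _ hD
  rw [repitation_eq, repitation_alt_eq]
  obtain ⟨h0, ⟨v, hv, hv0, hc⟩, hno⟩ := hD
  have h0mem : (0:Int) ∈ source := by
    apply List.count_pos_iff.mp; omega
  have hA : (repsM source).Nodup := by
    by_contra h
    rw [not_nodup_repsM_iff] at h
    obtain ⟨a, ha, b, hb, ha0, hb0, hab, hagt, hacc⟩ := h
    exact hno a ha b hb ha0 hb0 hab hagt hacc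
  have hB : ¬ (repsAll source).Nodup := by
    rw [not_nodup_repsAll_iff]
    exact ⟨0, h0mem, v, hv, fun h => hv0 h.symm, h0, hc.symm⟩
  simp [hA, hB]
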